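-- pv_equiv track=rewrite | github.com/AdaCore/training_material | contrib/fix_broken_titles.py | fix_titles
-- ===== SOURCE A (Python) =====
-- def fix_titles(s):
--     TEXT, SEP, TITLE = range(3)
--     st = TEXT
--
--     lout = []
--
--     for l in s:
--         line_is_title = (
--             len(l) > 1 and l[0] in "-=*" and all(c == l[0] for c in l.rstrip())
--         )
--         lout.append(l)
--         if st == TEXT:
--             if line_is_title:
--                 st = SEP
--         elif st == SEP:
--             if line_is_title:
--                 # Fake title start
--                 lout = lout[:-2]
--                 st = TEXT
--             else:
--                 if len(lout[-2]) < len(l):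
--                     # Fix opening separator
--                     lout[-2] = lout[-2][0] * len(l)
--                 st = TITLE
--         elif st == TITLE:
--             if line_is_title:
--                 if lout[-1].strip() != lout[-3].strip():
--                     # fix title by copying the previous one
--                     lout[-1] = lout[-3]
--             else:
--                 # drop title
--                 lout = lout[:-3]
--             st = TEXT
--
--     return lout
-- ===== SOURCE B (Python) =====
-- def fix_titles(s):
--     def is_sep(l):
--         return len(l) > 1 and l[0] in "-=*" and all(c == l[0] for c in l.rstrip())
--
--     out = []
--     i = 0
--     n = len(s)
--     while i < n:
--         l = s[i]
--         if not is_sep(l):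
--             out.append(l)
--             i += 1
--             continue
--         if i + 1 >= n:
--             out.append(l)
--             break
--         nxt = s[i + 1]
--         if is_sep(nxt):
--             # two consecutive separators: fake title start, drop both
--             i += 2
--             continue
--         sep = l[0] * len(nxt) if len(l) < len(nxt) else l
--         if i + 2 >= n:
--             out.append(sep)
--             out.append(nxt)
--             break
--         under = s[i + 2]
--         if is_sep(under):
--             out.append(sep)
--             out.append(nxt)
--             out.append(under if under.strip() == sep.strip() else sep)
--         # else: malformed block, drop separator, title text and the next line
--         i += 3
--     return out
-- ===== Notes on version B (the rewrite author's own statement) =====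
-- stated objective: alternative
-- what changed: Replaced A's append-then-truncate three-state machine over an accumulator list by a forward index scan with one-/two-line lookahead that classifies each title block up front and emits output only once, never backtracking.
import Mathlib
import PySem

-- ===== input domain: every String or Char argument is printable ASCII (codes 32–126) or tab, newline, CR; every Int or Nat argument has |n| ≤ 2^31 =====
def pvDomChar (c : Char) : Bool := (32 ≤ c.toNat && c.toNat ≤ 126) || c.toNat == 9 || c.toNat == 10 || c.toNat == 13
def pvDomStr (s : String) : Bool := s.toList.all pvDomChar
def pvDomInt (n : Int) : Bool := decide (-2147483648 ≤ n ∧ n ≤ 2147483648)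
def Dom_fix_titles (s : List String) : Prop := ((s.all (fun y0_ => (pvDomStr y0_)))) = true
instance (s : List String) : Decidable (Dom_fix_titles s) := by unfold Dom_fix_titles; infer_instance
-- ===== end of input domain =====

-- B replaces A's append-then-backtrack state machine by a forward scan with lookahead
-- that never truncates the output (objective: alternative decomposition, same cost).

-- ===== PORT A =====
-- line_is_title = len(l) > 1 and l[0] in "-=*" and all(c == l[0] for c in l.rstrip())
def pvTitle (l : String) : Bool :=
  decide (l.toList.length > 1) &&
    (match l.toList with
     | [] => false
     | c :: _ => ['-', '=', '*'].contains c && (PySem.Chars.rstrip l.toList).all (fun d => d == c))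

-- one iteration of A's for-loop; state 0 = TEXT, 1 = SEP, 2 = TITLE.
-- lout[-2]/lout[-1]/lout[-3] are always in range when read (the state guarantees
-- enough appended lines), so pyGetD's default "" is never used.
def pvStepA (acc : Nat × List String) (l : String) : Nat × List String :=
  let st := acc.1
  let lout := acc.2 ++ [l]
  if st = 0 then
    if pvTitle l then (1, lout) else (0, lout)
  else if st = 1 then
    if pvTitle l then
      -- fake title start: lout = lout[:-2]
      (0, PySem.List.slice lout none (some (-2)))
    else
      let lout :=
        if PySem.Str.len (PySem.List.pyGetD lout (-2) "") < PySem.Str.len l then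
          -- lout[-2] = lout[-2][0] * len(l)
          lout.set (lout.length - 2)
            (String.ofList (List.replicate l.toList.length ((PySem.List.pyGetD lout (-2) "").toList.headD ' ')))
        else lout
      (2, lout)
  else
    if pvTitle l then
      let lout :=
        if PySem.Str.strip (PySem.List.pyGetD lout (-1) "") ≠ PySem.Str.strip (PySem.List.pyGetD lout (-3) "") then
          -- lout[-1] = lout[-3]
          lout.set (lout.length - 1) (PySem.List.pyGetD lout (-3) "")
        else lout
      (0, lout)
    else
      -- drop title: lout = lout[:-3]
      (0, PySem.List.slice lout none (some (-3)))

def fix_titles (s : List String) : List String :=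
  (s.foldl pvStepA (0, [])).2

-- ===== PORT B =====
def pvSep (l : String) : Bool :=
  decide (l.toList.length > 1) &&
    (match l.toList with
     | [] => false
     | c :: _ => ['-', '=', '*'].contains c && (PySem.Chars.rstrip l.toList).all (fun d => d == c))

-- sep = l[0] * len(nxt) if len(l) < len(nxt) else l   (l is a separator, hence nonempty)
def pvWiden (l nxt : String) : String :=
  if PySem.Str.len l < PySem.Str.len nxt then
    String.ofList (List.replicate nxt.toList.length (l.toList.headD ' '))
  else l

-- forward scan with lookahead (Source B's while loop as structural recursion)
def pvScan : List String → List String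
  | [] => []
  | l :: rest =>
    if pvSep l = false then l :: pvScan rest
    else
      match rest with
      | [] => [l]
      | nxt :: rest' =>
        if pvSep nxt then pvScan rest'   -- two consecutive separators: drop both
        else
          let sep := pvWiden l nxt
          match rest' with
          | [] => [sep, nxt]
          | under :: rest'' =>
            if pvSep under then
              sep :: nxt :: (if PySem.Str.strip under = PySem.Str.strip sep then under else sep) :: pvScan rest''
            else pvScan rest''           -- malformed block: drop all three lines

def fix_titles_alt (s : List String) : List String := pvScan s

-- ===== PRECONDITION & SPEC =====
def Spec_fix_titles (s : List String) (out : List String) : Prop := out = fix_titles_alt s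
instance (s : List String) (out : List String) : Decidable (Spec_fix_titles s out) := by unfold Spec_fix_titles; infer_instance

-- ===== CLAIM (what is proved, stated in full; the proofs are below) =====
def Claim_equal_fix_titles : Prop := ∀ (s : List String), Dom_fix_titles s → Spec_fix_titles s (fix_titles s)

-- ===== LEMMAS AND PROOFS =====

theorem pvTitle_eq_pvSep (l : String) : pvTitle l = pvSep l := rfl


theorem pvGetD_neg2 (xs : List String) (a b d : String) :
    PySem.List.pyGetD (xs ++ [a, b]) (-2) d = a := by
  have h := PySem.List.pyGetD_neg_natCast (xs := xs ++ [a, b]) (d := d) (k := 2) (by omega) (by simp)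
  push_cast at h
  rw [h]; simp

theorem pvGetD_neg1 (xs : List String) (a b c d : String) :
    PySem.List.pyGetD (xs ++ [a, b, c]) (-1) d = c := by
  have h := PySem.List.pyGetD_neg_natCast (xs := xs ++ [a, b, c]) (d := d) (k := 1) (by omega) (by simp)
  push_cast at h
  rw [h]; simp

theorem pvGetD_neg3 (xs : List String) (a b c d : String) :
    PySem.List.pyGetD (xs ++ [a, b, c]) (-3) d = a := by
  have h := PySem.List.pyGetD_neg_natCast (xs := xs ++ [a, b, c]) (d := d) (k := 3) (by omega) (by simp)
  push_cast at h
  rw [h]; simp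

theorem pvSlice_neg2 (xs : List String) (a b : String) :
    PySem.List.slice (xs ++ [a, b]) none (some (-2)) = xs := by
  rw [PySem.List.slice_to_neg_ofNat _ 2 (by omega)]; simp

theorem pvSlice_neg3 (xs : List String) (a b c : String) :
    PySem.List.slice (xs ++ [a, b, c]) none (some (-3)) = xs := by
  rw [PySem.List.slice_to_neg_ofNat _ 3 (by omega)]; simp

theorem pvSet_neg2 (xs : List String) (a b v : String) :
    (xs ++ [a, b]).set ((xs ++ [a, b]).length - 2) v = xs ++ [v, b] := by
  simp

theorem pvSet_neg1 (xs : List String) (a b c v : String) :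
    (xs ++ [a, b, c]).set ((xs ++ [a, b, c]).length - 1) v = xs ++ [a, b, v] := by
  simp

theorem pvLoop (s lout : List String) :
    (List.foldl pvStepA (0, lout) s).2 = lout ++ pvScan s := by
  induction s using pvScan.induct generalizing lout with
  | case1 => simp [pvScan]
  | case2 l rest h ih =>
      rw [List.foldl_cons,
        show pvStepA (0, lout) l = (0, lout ++ [l]) by
          simp [pvStepA, pvTitle_eq_pvSep, h],
        ih]
      conv_rhs => rw [pvScan.eq_def]
      simp [h]
  | case3 l h =>
      replace h : pvSep l = true := by revert h; cases pvSep l <;> simp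
      simp [pvScan, h, List.foldl, pvStepA, pvTitle_eq_pvSep]
  | case4 l h nxt rest' hn ih =>
      replace h : pvSep l = true := by revert h; cases pvSep l <;> simp
      rw [List.foldl_cons,
        show pvStepA (0, lout) l = (1, lout ++ [l]) by
          simp [pvStepA, pvTitle_eq_pvSep, h],
        List.foldl_cons,
        show pvStepA (1, lout ++ [l]) nxt = (0, lout) by
          simp only [pvStepA, pvTitle_eq_pvSep, hn]
          rw [show lout ++ [l] ++ [nxt] = lout ++ [l, nxt] by simp]
          simp [pvSlice_neg2],
        ih]
      conv_rhs => rw [pvScan.eq_def]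
      simp [h, hn]
  | case5 l h nxt hn =>
      replace h : pvSep l = true := by revert h; cases pvSep l <;> simp
      replace hn : pvSep nxt = false := by revert hn; cases pvSep nxt <;> simp
      rw [List.foldl_cons,
        show pvStepA (0, lout) l = (1, lout ++ [l]) by
          simp [pvStepA, pvTitle_eq_pvSep, h],
        List.foldl_cons,
        show pvStepA (1, lout ++ [l]) nxt = (2, lout ++ [pvWiden l nxt, nxt]) by
          simp only [pvStepA, pvTitle_eq_pvSep, hn]
          rw [show lout ++ [l] ++ [nxt] = lout ++ [l, nxt] by simp]
          norm_num [pvGetD_neg2, pvSet_neg2]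
          unfold pvWiden PySem.Str.len
          split <;> simp_all]
      conv_rhs => rw [pvScan.eq_def]
      simp [List.foldl, h, hn]
  | case6 l h nxt hn under rest'' hu ih =>
      replace h : pvSep l = true := by revert h; cases pvSep l <;> simp
      replace hn : pvSep nxt = false := by revert hn; cases pvSep nxt <;> simp
      rw [List.foldl_cons,
        show pvStepA (0, lout) l = (1, lout ++ [l]) by
          simp [pvStepA, pvTitle_eq_pvSep, h],
        List.foldl_cons,
        show pvStepA (1, lout ++ [l]) nxt = (2, lout ++ [pvWiden l nxt, nxt]) by
          simp only [pvStepA, pvTitle_eq_pvSep, hn]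
          rw [show lout ++ [l] ++ [nxt] = lout ++ [l, nxt] by simp]
          norm_num [pvGetD_neg2, pvSet_neg2]
          unfold pvWiden PySem.Str.len
          split <;> simp_all,
        List.foldl_cons,
        show pvStepA (2, lout ++ [pvWiden l nxt, nxt]) under
            = (0, lout ++ [pvWiden l nxt, nxt,
                if PySem.Str.strip under = PySem.Str.strip (pvWiden l nxt) then under
                else pvWiden l nxt]) by
          simp only [pvStepA, pvTitle_eq_pvSep, hu]
          rw [show lout ++ [pvWiden l nxt, nxt] ++ [under] = lout ++ [pvWiden l nxt, nxt, under] by simp]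
          simp only [pvGetD_neg1, pvGetD_neg3, pvSet_neg1]
          by_cases hs : PySem.Str.strip under = PySem.Str.strip (pvWiden l nxt) <;> simp [hs],
        ih]
      conv_rhs => rw [pvScan.eq_def]
      simp [h, hn, hu]
  | case7 l h nxt hn under rest'' hu ih =>
      replace h : pvSep l = true := by revert h; cases pvSep l <;> simp
      replace hn : pvSep nxt = false := by revert hn; cases pvSep nxt <;> simp
      replace hu : pvSep under = false := by revert hu; cases pvSep under <;> simp
      rw [List.foldl_cons,
        show pvStepA (0, lout) l = (1, lout ++ [l]) by
          simp [pvStepA, pvTitle_eq_pvSep, h],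
        List.foldl_cons,
        show pvStepA (1, lout ++ [l]) nxt = (2, lout ++ [pvWiden l nxt, nxt]) by
          simp only [pvStepA, pvTitle_eq_pvSep, hn]
          rw [show lout ++ [l] ++ [nxt] = lout ++ [l, nxt] by simp]
          norm_num [pvGetD_neg2, pvSet_neg2]
          unfold pvWiden PySem.Str.len
          split <;> simp_all,
        List.foldl_cons,
        show pvStepA (2, lout ++ [pvWiden l nxt, nxt]) under = (0, lout) by
          simp only [pvStepA, pvTitle_eq_pvSep, hu]
          rw [show lout ++ [pvWiden l nxt, nxt] ++ [under] = lout ++ [pvWiden l nxt, nxt, under] by simp]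
          simp [pvSlice_neg3],
        ih]
      conv_rhs => rw [pvScan.eq_def]
      simp [h, hn, hu]

-- ===== VERDICT (by name: the statement is the Claim_ definition above) =====
theorem fix_titles_spec : Claim_equal_fix_titles := by
  intro s _
  unfold Spec_fix_titles fix_titles fix_titles_alt
  simpa using pvLoop s []
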